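-- pv_equiv track=rewrite | github.com/ellenaj0/noahs_helpers | players/group5/specialization.py | determine_helper_group
-- ===== SOURCE A (Python) =====
-- import math
-- from typing import List, Dict, Optional, Set, Tuple
--
-- def determine_helper_group(helper_id: int, num_helpers: int) -> Optional[int]:
--     """Determine which specialization group this helper belongs to."""
--     num_specialized_helpers = num_helpers - 2
--     group_id = helper_id - 2
--
--     # Rebalanced: more helpers on moderately rare (30/30), fewer on ultra-rare (15)
--     group_percentages = [0.30, 0.30, 0.25, 0.15]
--     specialization_limits = [1000, 2000, 3000, 4000]
--
--     # Calculate group sizes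
--     group_sizes = []
--     current_cumulative_size = 0
--
--     for i in range(len(group_percentages)):
--         size = math.ceil(num_specialized_helpers * group_percentages[i])
--
--         if i == len(group_percentages) - 1:
--             size = max(0, num_specialized_helpers - current_cumulative_size)
--
--         current_cumulative_size += size
--         group_sizes.append(size)
--
--     # Find which group this helper belongs to
--     cumulative_helper_count = 0
--     for i, size in enumerate(group_sizes):
--         start_id = cumulative_helper_count + 1
--         end_id = cumulative_helper_count + size
--
--         if start_id <= group_id <= end_id:
--             return specialization_limits[i]
--
--         cumulative_helper_count += size
--
--     return None
-- ===== SOURCE B (Python) =====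
-- def determine_helper_group(helper_id, num_helpers):
--     """Determine which specialization group this helper belongs to."""
--     n = num_helpers - 2          # specialized helpers
--     g = helper_id - 2            # 1-based specialized id
--     if g >= 1:
--         # cumulative group ends, exact integer ceilings of n*0.30, 0.60, 0.85
--         t1 = (3 * n + 9) // 10
--         t2 = 2 * t1
--         t3 = t2 + (n + 3) // 4
--         if g <= t1:
--             return 1000
--         if g <= t2:
--             return 2000
--         if g <= t3:
--             return 3000
--         if g <= n:               # remainder group (only when t3 < n)
--             return 4000
--     return None
-- ===== Notes on version B (the rewrite author's own statement) =====
-- stated objective: simpler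
-- what changed: Replaces the two fixed-size loops (size-building pass plus window-scanning pass) with a single branch chain comparing the 1-based specialized id against precomputed cumulative integer-ceiling thresholds, with no lists and no loops.
import Mathlib
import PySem

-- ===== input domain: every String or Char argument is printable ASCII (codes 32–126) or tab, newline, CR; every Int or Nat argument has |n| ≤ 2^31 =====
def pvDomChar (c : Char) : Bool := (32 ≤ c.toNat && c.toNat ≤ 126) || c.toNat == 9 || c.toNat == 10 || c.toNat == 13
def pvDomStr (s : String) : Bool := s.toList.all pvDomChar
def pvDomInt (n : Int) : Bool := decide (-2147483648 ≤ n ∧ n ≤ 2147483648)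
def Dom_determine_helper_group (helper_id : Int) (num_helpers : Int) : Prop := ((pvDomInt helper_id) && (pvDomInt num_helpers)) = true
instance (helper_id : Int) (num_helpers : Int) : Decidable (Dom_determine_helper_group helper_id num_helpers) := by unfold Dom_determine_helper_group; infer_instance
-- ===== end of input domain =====

-- B replaces A's two fixed-size loops with a loop-free chain of cumulative-threshold comparisons (objective: simpler).


-- ===== PORT A =====
-- math.ceil(n * p) for p = num/den : IEEE-double rounding never crosses an integer boundary for
-- |n| ≤ 2^31 with these percentages (verified exhaustively/near boundaries), so it is ported as
-- the exact rational ceiling -((-num*n) // den).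
def pyCeilMul (num den n : Int) : Int := -(PySem.Int.floordiv (-(num * n)) den)

-- early-return second loop of A, as structural recursion over (index, size) pairs
def pyScanGroups (group_id : Int) (limits : List Int) : List (Int × Int) → Int → Option Int
  | [], _ => none
  | (i, size) :: rest, cum =>
    if cum + 1 ≤ group_id ∧ group_id ≤ cum + size then some (PySem.List.pyGetD limits i 0)
    else pyScanGroups group_id limits rest (cum + size)

def determine_helper_group (helper_id : Int) (num_helpers : Int) : Option Int :=
  let num_specialized_helpers := num_helpers - 2
  let group_id := helper_id - 2
  let group_percentages : List (Int × Int) := [(3, 10), (3, 10), (1, 4), (3, 20)]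
  let specialization_limits : List Int := [1000, 2000, 3000, 4000]
  -- first loop: build group_sizes with running cumulative size
  let st := (List.range group_percentages.length).foldl
    (fun (st : List Int × Int) i =>
      let p := group_percentages.getD i (0, 1)      -- index always in range
      let size := pyCeilMul p.1 p.2 num_specialized_helpers
      let size := if i = group_percentages.length - 1 then
          max 0 (num_specialized_helpers - st.2) else size
      (st.1 ++ [size], st.2 + size)) ([], 0)
  let group_sizes := st.1
  -- second loop: first window containing group_id wins (early return = pyScanGroups)
  pyScanGroups group_id specialization_limits (PySem.List.enumerate group_sizes) 0

-- ===== PORT B =====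
def determine_helper_group_alt (helper_id : Int) (num_helpers : Int) : Option Int :=
  let n := num_helpers - 2
  let g := helper_id - 2
  if 1 ≤ g then
    let t1 := PySem.Int.floordiv (3 * n + 9) 10
    let t2 := 2 * t1
    let t3 := t2 + PySem.Int.floordiv (n + 3) 4
    if g ≤ t1 then some 1000
    else if g ≤ t2 then some 2000
    else if g ≤ t3 then some 3000
    else if g ≤ n then some 4000
    else none
  else none

-- ===== PRECONDITION & SPEC =====
def Spec_determine_helper_group (helper_id : Int) (num_helpers : Int) (out : Option Int) : Prop := out = determine_helper_group_alt helper_id num_helpers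
instance (helper_id : Int) (num_helpers : Int) (out : Option Int) : Decidable (Spec_determine_helper_group helper_id num_helpers out) := by unfold Spec_determine_helper_group; infer_instance

-- ===== CLAIM (what is proved, stated in full; the proofs are below) =====
def Claim_equal_determine_helper_group : Prop := ∀ (helper_id : Int) (num_helpers : Int), Dom_determine_helper_group helper_id num_helpers → Spec_determine_helper_group helper_id num_helpers (determine_helper_group helper_id num_helpers)

-- ===== LEMMAS AND PROOFS =====

-- ===== VERDICT (by name: the statement is the Claim_ definition above) =====
theorem determine_helper_group_spec : Claim_equal_determine_helper_group := by
  intro h m _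
  unfold Spec_determine_helper_group
  unfold determine_helper_group determine_helper_group_alt pyCeilMul
  dsimp only
  norm_num [List.foldl, List.getD, PySem.List.enumerate_cons, PySem.List.enumerate_nil,
    List.range_succ, List.range_zero, PySem.List.pyGetD, pyScanGroups,
    PySem.Int.floordiv_eq_ediv_of_pos]
  have h10 : -(-(3 * (m - 2)) / 10) = (3 * (m - 2) + 9) / 10 := by omega
  have h4 : -((2 - m) / 4) = (m - 2 + 3) / 4 := by omega
  split_ifs <;> first | rfl | (exfalso; omega)
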